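-- pv_equiv track=rewrite | github.com/nemo-0/advent-of-code | 2015/day01/solution.py | get_floor
-- ===== SOURCE A (Python) =====
-- def get_floor(instructions, part_two=False):
-- 	floor = 0
-- 	basement_position = 0
-- 	for i, instruction in enumerate(instructions):
-- 		if instruction == "(":
-- 			floor += 1
-- 		else:
-- 			floor -= 1
--
-- 		if part_two:
-- 			if floor == -1:
-- 				basement_position = i + 1
-- 				return basement_position
--
-- 	return floor
-- ===== SOURCE B (Python) =====
-- def get_floor(instructions, part_two=False):
-- 	# stage 1: materialize the list of running-floor values after each instruction
-- 	prefixes = [0]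
-- 	floor = 0
-- 	for c in instructions:
-- 		floor += 1 if c == "(" else -1
-- 		prefixes.append(floor)
-- 	# stage 2: the first basement position is the index of the first -1 in that list
-- 	if part_two and -1 in prefixes:
-- 		return prefixes.index(-1)
-- 	return floor
-- ===== Notes on version B (the rewrite author's own statement) =====
-- stated objective: alternative
-- what changed: Instead of a single pass with an early return, B materializes the whole prefix-sum list of running floors in one stage and then answers part two by looking up the index of the first -1 in that list (and part one as the last running value).
import Mathlib
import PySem

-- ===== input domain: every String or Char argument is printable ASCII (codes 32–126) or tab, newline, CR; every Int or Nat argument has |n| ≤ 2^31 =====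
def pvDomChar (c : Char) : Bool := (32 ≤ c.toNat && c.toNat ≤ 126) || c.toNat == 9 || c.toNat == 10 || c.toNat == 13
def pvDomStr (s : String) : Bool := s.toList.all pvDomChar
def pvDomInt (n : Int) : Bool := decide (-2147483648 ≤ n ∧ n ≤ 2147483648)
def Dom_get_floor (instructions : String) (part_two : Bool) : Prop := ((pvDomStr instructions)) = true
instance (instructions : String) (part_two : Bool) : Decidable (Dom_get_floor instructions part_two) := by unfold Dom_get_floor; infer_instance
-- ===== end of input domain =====

-- B replaces A's single early-returning scan by two stages: materialize the prefix-sum list of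
-- running floors, then answer part two as the index of the first -1 in it; objective: alternative.

-- ===== PORT A =====
-- A's loop: running floor, early return of i+1 when part_two and floor hits -1.
def getFloorLoopA : List Char → Nat → Int → Bool → Int
  | [], _, floor, _ => floor
  | c :: rest, i, floor, pt =>
    let floor' := if c = '(' then floor + 1 else floor - 1
    if pt = true ∧ floor' = -1 then ((i : Int) + 1)
    else getFloorLoopA rest (i + 1) floor' pt

def get_floor (instructions : String) (part_two : Bool) : Int :=
  getFloorLoopA instructions.toList 0 0 part_two

-- ===== PORT B =====
-- stage 1 of Source B: the loop appending each running floor to `prefixes`; state = (prefixes, floor).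
def get_floor_alt (instructions : String) (part_two : Bool) : Int :=
  let st := instructions.toList.foldl
    (fun (st : List Int × Int) c =>
      let f := st.2 + (if c = '(' then 1 else -1)
      (st.1 ++ [f], f)) ([0], 0)
  if part_two = true ∧ (-1 : Int) ∈ st.1 then
    match PySem.List.index? st.1 (-1) with
    | some k => (k : Int)
    | none => st.2   -- unreachable: guarded by membership
  else st.2

-- ===== PRECONDITION & SPEC =====
def Spec_get_floor (instructions : String) (part_two : Bool) (out : Int) : Prop := out = get_floor_alt instructions part_two
instance (instructions : String) (part_two : Bool) (out : Int) : Decidable (Spec_get_floor instructions part_two out) := by unfold Spec_get_floor; infer_instance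

-- ===== CLAIM (what is proved, stated in full; the proofs are below) =====
def Claim_equal_get_floor : Prop := ∀ (instructions : String) (part_two : Bool), Dom_get_floor instructions part_two → Spec_get_floor instructions part_two (get_floor instructions part_two)

-- ===== LEMMAS AND PROOFS =====
-- per-character floor delta
def pvDelta (c : Char) : Int := if c = '(' then 1 else -1

def pvSum (cs : List Char) : Int := (cs.map pvDelta).sum

-- the list of running floors produced from start value f
def pvPrefix : List Char → Int → List Int
  | [], _ => []
  | c :: rest, f => (f + pvDelta c) :: pvPrefix rest (f + pvDelta c)

-- B's foldl state, characterized
lemma foldB_char (cs : List Char) (ps : List Int) (f : Int) :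
    cs.foldl (fun (st : List Int × Int) c =>
      let f := st.2 + (if c = '(' then 1 else -1)
      (st.1 ++ [f], f)) (ps, f)
      = (ps ++ pvPrefix cs f, f + pvSum cs) := by
  induction cs generalizing ps f with
  | nil => simp [pvPrefix, pvSum]
  | cons c rest ih =>
    simp only [List.foldl_cons, ih, pvPrefix, pvSum, List.map_cons, List.sum_cons, pvDelta,
      Prod.mk.injEq]
    refine ⟨by simp, by ring⟩

-- A's loop with part_two = false is the signed sum
lemma loopA_false (cs : List Char) (i : Nat) (f : Int) :
    getFloorLoopA cs i f false = f + pvSum cs := by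
  induction cs generalizing i f with
  | nil => simp [getFloorLoopA, pvSum]
  | cons c rest ih =>
    show getFloorLoopA rest (i+1) (if c = '(' then f + 1 else f - 1) false = _
    rw [ih]
    by_cases h : c = '(' <;> simp [h, pvSum, pvDelta] <;> ring

-- A's loop with part_two = true: first index of -1 among the running floors, else the final floor
lemma loopA_true (cs : List Char) (i : Nat) (f : Int) :
    getFloorLoopA cs i f true =
      match PySem.List.index? (pvPrefix cs f) (-1) with
      | some j => (i : Int) + j + 1
      | none => f + pvSum cs := by
  induction cs generalizing i f with
  | nil => simp [getFloorLoopA, pvSum, pvPrefix, PySem.List.index?]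
  | cons c rest ih =>
    have hstep : (if c = '(' then f + 1 else f - 1) = f + pvDelta c := by
      by_cases h : c = '(' <;> simp [h, pvDelta] <;> ring
    show (if true = true ∧ (if c = '(' then f + 1 else f - 1) = -1 then ((i : Int) + 1)
          else getFloorLoopA rest (i+1) (if c = '(' then f + 1 else f - 1) true) = _
    rw [hstep]
    by_cases hb : f + pvDelta c = -1
    · rw [if_pos ⟨rfl, hb⟩,
        show pvPrefix (c :: rest) f = (f + pvDelta c) :: pvPrefix rest (f + pvDelta c) from rfl,
        hb, PySem.List.index?_cons_self]
      simp
    · rw [if_neg (by simp [hb]), ih,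
        show pvPrefix (c :: rest) f = (f + pvDelta c) :: pvPrefix rest (f + pvDelta c) from rfl,
        PySem.List.index?_cons_of_ne _ hb]
      cases hidx : PySem.List.index? (pvPrefix rest (f + pvDelta c)) (-1) with
      | none =>
        show f + pvDelta c + pvSum rest = f + pvSum (c :: rest)
        simp [pvSum]
        ring
      | some j =>
        show ((i + 1 : Nat) : Int) + j + 1 = (i : Int) + ((j + 1 : Nat) : Int) + 1
        push_cast
        ring

-- ===== VERDICT (by name: the statement is the Claim_ definition above) =====
theorem get_floor_spec : Claim_equal_get_floor := by
  intro s pt _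
  unfold Spec_get_floor get_floor get_floor_alt
  simp only [foldB_char]
  cases pt with
  | false =>
    rw [if_neg (by simp)]
    simpa using loopA_false s.toList 0 0
  | true =>
    rw [loopA_true]
    cases hidx : PySem.List.index? (pvPrefix s.toList 0) (-1) with
    | some j =>
      have hm : (-1 : Int) ∈ pvPrefix s.toList 0 :=
        (PySem.List.index?_isSome_iff _ _).mp (by rw [hidx]; rfl)
      rw [if_pos ⟨rfl, List.mem_append_right [0] hm⟩,
        show ([0] ++ pvPrefix s.toList 0 : List Int) = 0 :: pvPrefix s.toList 0 from rfl,
        PySem.List.index?_cons_of_ne _ (by decide), hidx]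
      show (0 : Int) + (j : Int) + 1 = ((j + 1 : Nat) : Int)
      push_cast
      ring
    | none =>
      have hnm : (-1 : Int) ∉ pvPrefix s.toList 0 :=
        (PySem.List.index?_eq_none_iff _ _).mp hidx
      rw [if_neg (by simp [hnm])]
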